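-- pv_equiv track=rewrite | github.com/AlgToDev/BillboardsJava | billboards_dpv1.py | billboards
-- ===== SOURCE A (Python) =====
-- def billboards(k, revenue):
--     N = len(revenue)
--
--     total = sum(revenue)
--
--     dp = [0] * N
--
--     if k == N:
--         return total
--     else:
--         # Initialize the dp array with the first k + 1 revenues
--         for i in range(k + 1):
--             dp[i] = revenue[i]
--
--         # Keep track of the minimum value and index in the sliding window of size k + 1
--         min_value = min(dp[:k + 1])
--         min_index = dp.index(min_value)
--
--         # Update the dp array using the recurrence relation
--         # dp[i] = min(dp[i - k - 1], ..., dp[i - 1]) + revenue[i]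
--         for i in range(k + 1, N):
--             # If the minimum value is outside the window, find a new one
--             if i - min_index > k:
--                 min_value = min(dp[i - k - 1 : i])
--                 min_index = dp.index(min_value)
--
--             # Add the revenue of the current billboard to the minimum value in the window
--             dp[i] = min_value + revenue[i]
--
--             # Update the minimum value and index if needed
--             if dp[i] < min_value:
--                 min_value = dp[i]
--                 min_index = i
--
--         # Return the total revenue minus the minimum value in the last window
--         return total - min(dp[N - k - 1 :])
-- ===== SOURCE B (Python) =====
-- def billboards(k, revenue):
--     n = len(revenue)
--     total = sum(revenue)
--     if k == n:
--         return total
--     # Monotonic deque of (index, dp-value) pairs with strictly increasing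
--     # dp-values; its front is the minimum of the current window of dp.
--     q = []
--     for i, r in enumerate(revenue):
--         if i <= k:
--             v = r
--         else:
--             while q[0][0] < i - k - 1:
--                 q.pop(0)
--             v = q[0][1] + r
--         while q and q[-1][1] >= v:
--             q.pop()
--         q.append((i, v))
--     while q[0][0] < n - k - 1:
--         q.pop(0)
--     return total - q[0][1]
-- ===== Notes on version B (the rewrite author's own statement) =====
-- stated objective: alternative
-- what changed: Replaces A's min_value/min_index bookkeeping with its conditional window rescans (min over a slice plus a full-array dp.index scan) by a one-pass monotonic-deque sliding-window minimum over (index, dp-value) pairs, which also drops the materialised dp array; worst-case cost drops from O(N*k) to O(N) but on easy inputs both are linear, so no blanket speed claim is made.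
import Mathlib
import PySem

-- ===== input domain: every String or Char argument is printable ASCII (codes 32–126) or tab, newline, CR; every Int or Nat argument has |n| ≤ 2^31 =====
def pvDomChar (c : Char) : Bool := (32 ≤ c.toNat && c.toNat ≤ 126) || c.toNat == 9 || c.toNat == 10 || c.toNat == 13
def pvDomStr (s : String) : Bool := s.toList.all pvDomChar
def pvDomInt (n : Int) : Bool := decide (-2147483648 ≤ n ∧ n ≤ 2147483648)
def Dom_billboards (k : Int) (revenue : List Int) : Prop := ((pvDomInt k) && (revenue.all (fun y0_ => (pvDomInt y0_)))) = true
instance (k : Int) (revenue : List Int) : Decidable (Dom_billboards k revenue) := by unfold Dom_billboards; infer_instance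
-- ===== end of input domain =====

-- B replaces A's min_value/min_index tracking (with its conditional window rescans and full-array
-- dp.index scans) by a monotonic-deque sliding-window minimum in a single pass over the revenues;
-- the return values agree on all of Pre_.

-- ===== PORT A =====
def stepA (k : Int) (revenue : List Int) (s : List Int × Int × Int) (i : Int) : List Int × Int × Int :=
  let dp := s.1
  let mv := s.2.1
  let mi := s.2.2
  let p : Int × Int :=
    if i - mi > k then
      let m := (PySem.List.min? (PySem.List.slice dp (some (i - k - 1)) (some i)) (fun x => x)).getD 0
      (m, (((PySem.List.index? dp m).getD 0 : Nat) : Int))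
    else (mv, mi)
  let mv := p.1
  let mi := p.2
  let dp := PySem.List.pySetD dp i (mv + PySem.List.pyGetD revenue i 0)
  if PySem.List.pyGetD dp i 0 < mv then (dp, PySem.List.pyGetD dp i 0, i) else (dp, mv, mi)

def billboards (k : Int) (revenue : List Int) : Int :=
  let N : Int := (revenue.length : Int)
  let total : Int := revenue.sum
  let dp : List Int := List.replicate revenue.length (0 : Int)
  if k = N then total
  else
    let dp := (PySem.List.pyRange 0 (k + 1) 1).foldl
      (fun dp i => PySem.List.pySetD dp i (PySem.List.pyGetD revenue i 0)) dp
    let mv := (PySem.List.min? (PySem.List.slice dp none (some (k + 1))) (fun x => x)).getD 0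
    let mi : Int := (((PySem.List.index? dp mv).getD 0 : Nat) : Int)
    let s := (PySem.List.pyRange (k + 1) N 1).foldl (stepA k revenue) (dp, mv, mi)
    total - (PySem.List.min? (PySem.List.slice s.1 (some (N - k - 1)) none) (fun x => x)).getD 0

-- ===== PORT B =====
def popFrontB (bound : Int) : List (Int × Int) → List (Int × Int)
  | [] => []
  | p :: q => if p.1 < bound then popFrontB bound q else p :: q

def popBackGeB (v : Int) (q : List (Int × Int)) : List (Int × Int) :=
  (q.reverse.dropWhile (fun p => decide (v ≤ p.2))).reverse

def stepB (k : Int) (q : List (Int × Int)) (p : Int × Int) : List (Int × Int) :=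
  let i := p.1
  let r := p.2
  if i ≤ k then
    popBackGeB r q ++ [(i, r)]
  else
    let q := popFrontB (i - k - 1) q
    let v := (q.headD (0, 0)).2 + r
    popBackGeB v q ++ [(i, v)]

def billboards_alt (k : Int) (revenue : List Int) : Int :=
  let n : Int := (revenue.length : Int)
  let total : Int := revenue.sum
  if k = n then total
  else
    let q := (PySem.List.enumerate revenue 0).foldl (stepB k) []
    let q := popFrontB (n - k - 1) q
    total - (q.headD (0, 0)).2

-- ===== PRECONDITION & SPEC =====
-- Pre_ is the task's natural domain 0 ≤ k ≤ len(revenue); A raises everywhere outside it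
-- (ValueError from min() of an empty slice when k < 0, IndexError at dp[i] = revenue[i] when k > len(revenue)).
def Pre_billboards (k : Int) (revenue : List Int) : Prop := 0 ≤ k ∧ k ≤ (revenue.length : Int)
instance (k : Int) (revenue : List Int) : Decidable (Pre_billboards k revenue) := by unfold Pre_billboards; infer_instance

def pvWitness_billboards : Int × List Int := (1, [3, -1, 2, 4])

def Spec_billboards (k : Int) (revenue : List Int) (out : Int) : Prop := out = billboards_alt k revenue
instance (k : Int) (revenue : List Int) (out : Int) : Decidable (Spec_billboards k revenue out) := by unfold Spec_billboards; infer_instance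

-- ===== CLAIM (what is proved, stated in full; the proofs are below) =====
def Claim_equal_billboards : Prop := ∀ (k : Int) (revenue : List Int), Dom_billboards k revenue → Pre_billboards k revenue → Spec_billboards k revenue (billboards k revenue)

-- ===== LEMMAS AND PROOFS =====

def dpListB (K : Nat) (rev : List Int) : Nat → List Int
  | 0 => []
  | (i+1) =>
    let d := dpListB K rev i
    d ++ [if i ≤ K then rev.getD i 0
          else (match d.drop (i - (K+1)) with | [] => 0 | a :: t => t.foldl min a) + rev.getD i 0]

def dpV (K : Nat) (rev : List Int) (i : Nat) : Int := (dpListB K rev (i+1)).getD i 0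

def IsWMin (K : Nat) (rev : List Int) (lo hi : Nat) (m : Int) : Prop :=
  (∃ j, lo ≤ j ∧ j < hi ∧ dpV K rev j = m) ∧ (∀ j, lo ≤ j → j < hi → m ≤ dpV K rev j)

theorem length_dpListB (K : Nat) (rev : List Int) (i : Nat) : (dpListB K rev i).length = i := by
  induction i with
  | zero => rfl
  | succ i ih => simp [dpListB, ih]

theorem dpListB_succ (K : Nat) (rev : List Int) (i : Nat) :
    dpListB K rev (i+1) = dpListB K rev i ++ [dpV K rev i] := by
  conv_lhs => rw [dpListB]
  simp [dpV]
  rw [dpListB]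
  simp [length_dpListB]

theorem getD_dpListB (K : Nat) (rev : List Int) {i m : Nat} (h : i < m) :
    (dpListB K rev m).getD i 0 = dpV K rev i := by
  induction m with
  | zero => omega
  | succ m ih =>
    rcases Nat.lt_or_ge i m with hm | hm
    · rw [dpListB_succ, List.getD_eq_getElem?_getD, List.getElem?_append_left (by simp [length_dpListB]; omega), ← List.getD_eq_getElem?_getD, ih hm]
    · have : i = m := by omega
      subst this; rfl

theorem IsWMin_unique (K : Nat) (rev : List Int) {lo hi : Nat} {m m' : Int}
    (h : IsWMin K rev lo hi m) (h' : IsWMin K rev lo hi m') : m = m' := by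
  obtain ⟨⟨j, hj1, hj2, hj3⟩, hle⟩ := h
  obtain ⟨⟨j', hj1', hj2', hj3'⟩, hle'⟩ := h'
  have := hle' j hj1 hj2
  have := hle j' hj1' hj2'
  omega

theorem getElem_dpListB (K : Nat) (rev : List Int) {i m : Nat} (h : i < (dpListB K rev m).length) :
    (dpListB K rev m)[i] = dpV K rev i := by
  have h' : i < m := by simpa [length_dpListB] using h
  rw [← List.getD_eq_getElem _ 0 h, getD_dpListB K rev h']

theorem wmin_drop (K : Nat) (rev : List Int) (i lo : Nat) (hlo : lo < i) :
    IsWMin K rev lo i (match (dpListB K rev i).drop lo with | [] => 0 | a :: t => t.foldl min a) := by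
  have hlen : ((dpListB K rev i).drop lo).length = i - lo := by simp [length_dpListB]
  have hget : ∀ (j : Nat) (hj : j < ((dpListB K rev i).drop lo).length),
      ((dpListB K rev i).drop lo)[j] = dpV K rev (lo + j) := by
    intro j hj
    simp only [List.getElem_drop]
    exact getElem_dpListB K rev _
  rcases hd : (dpListB K rev i).drop lo with _ | ⟨a, t⟩
  · simp [hd] at hlen; omega
  · simp only
    constructor
    · have hmem : t.foldl min a ∈ a :: t := by
        rcases PySem.List.foldl_min_mem t a with h | h
        · simp [h]
        · exact List.mem_cons_of_mem _ h
      rw [← hd] at hmem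
      obtain ⟨j, hj, hje⟩ := List.mem_iff_getElem.mp hmem
      refine ⟨lo + j, by omega, by rw [hlen] at hj; omega, ?_⟩
      rw [← hget j hj, hje]
    · intro j hj1 hj2
      have hj' : j - lo < ((dpListB K rev i).drop lo).length := by omega
      have hval : dpV K rev j = ((dpListB K rev i).drop lo)[j - lo]'hj' := by
        rw [hget (j - lo) hj']; congr 1; omega
      have hmem : dpV K rev j ∈ (dpListB K rev i).drop lo := by
        rw [hval]; exact List.getElem_mem _
      rw [hd] at hmem
      rcases List.mem_cons.mp hmem with h | h
      · rw [h]; exact (PySem.List.foldl_min_le t a).1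
      · exact (PySem.List.foldl_min_le t a).2 _ h

theorem dpV_of_le (K : Nat) (rev : List Int) {i : Nat} (h : i ≤ K) :
    dpV K rev i = rev.getD i 0 := by
  unfold dpV
  conv_lhs => rw [dpListB]
  simp [length_dpListB, h]

theorem dpV_of_gt (K : Nat) (rev : List Int) {i : Nat} (h : K < i) :
    ∃ m, IsWMin K rev (i - (K+1)) i m ∧ dpV K rev i = m + rev.getD i 0 := by
  refine ⟨_, wmin_drop K rev i (i - (K+1)) (by omega), ?_⟩
  unfold dpV
  conv_lhs => rw [dpListB]
  simp only [List.getD_eq_getElem?_getD]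
  rw [List.getElem?_append_right (by simp [length_dpListB])]
  simp [length_dpListB, Nat.not_le.mpr h]

theorem set_dp (K : Nat) (rev : List Int) (n i : Nat) (hin : i < n) (v : Int) (hv : v = dpV K rev i) :
    (dpListB K rev i ++ List.replicate (n - i) (0:Int)).set i v
      = dpListB K rev (i+1) ++ List.replicate (n - (i+1)) 0 := by
  rw [List.set_append_right _ _ (by simp [length_dpListB])]
  rw [dpListB_succ]
  have h1 : n - i = 1 + (n - (i+1)) := by omega
  rw [h1, List.replicate_add, length_dpListB]
  simp [hv]

theorem getD_dp_append (K : Nat) (rev : List Int) (n i j : Nat) (hj : j < i) (hi : i ≤ n) :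
    (dpListB K rev i ++ List.replicate (n - i) (0:Int)).getD j 0 = dpV K rev j := by
  rw [List.getD_eq_getElem?_getD, List.getElem?_append_left (by simp [length_dpListB]; omega),
    ← List.getD_eq_getElem?_getD, getD_dpListB K rev hj]

theorem mem_dp_append (K : Nat) (rev : List Int) (n i p : Nat) (hp : p < i) (hi : i ≤ n) :
    dpV K rev p ∈ dpListB K rev i ++ List.replicate (n - i) (0:Int) := by
  have : dpV K rev p ∈ dpListB K rev i := by
    rw [← getElem_dpListB K rev (i := p) (m := i) (by simp [length_dpListB]; omega)]
    exact List.getElem_mem _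
  exact List.mem_append_left _ this

theorem slice_dp (K : Nat) (rev : List Int) (n i : Nat) (hi : K + 1 ≤ i) (hin : i < n) :
    PySem.List.slice (dpListB K rev i ++ List.replicate (n - i) (0:Int))
        (some ((i:Int) - (K:Int) - 1)) (some (i:Int))
      = (dpListB K rev i).drop (i - (K+1)) := by
  have hc : (i:Int) - (K:Int) - 1 = ((i - (K+1) : Nat) : Int) := by omega
  rw [hc, PySem.List.slice_natCast]
  rw [List.drop_append_of_le_length (by simp [length_dpListB]; try omega)]
  rw [List.take_append_of_le_length (by simp [length_dpListB]; try omega)]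
  rw [List.take_of_length_le (by simp [length_dpListB]; try omega)]

-- the 'min(dp[i-k-1:i])' + 'dp.index(min_value)' pair of A, evaluated on the real dp

theorem recompute_eval (K : Nat) (rev : List Int) (n i : Nat) (hn : n = rev.length)
    (hi : K + 1 ≤ i) (hin : i < n) :
    (IsWMin K rev (i - (K+1)) i
      ((PySem.List.min? (PySem.List.slice (dpListB K rev i ++ List.replicate (n - i) (0:Int))
          (some ((i:Int) - (K:Int) - 1)) (some (i:Int))) (fun x => x)).getD 0)) ∧
    ∃ q0 : Nat, (PySem.List.index? (dpListB K rev i ++ List.replicate (n - i) (0:Int))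
        ((PySem.List.min? (PySem.List.slice (dpListB K rev i ++ List.replicate (n - i) (0:Int))
          (some ((i:Int) - (K:Int) - 1)) (some (i:Int))) (fun x => x)).getD 0)).getD 0 = q0
      ∧ q0 < i ∧ dpV K rev q0 =
        ((PySem.List.min? (PySem.List.slice (dpListB K rev i ++ List.replicate (n - i) (0:Int))
          (some ((i:Int) - (K:Int) - 1)) (some (i:Int))) (fun x => x)).getD 0) := by
  rw [slice_dp K rev n i hi hin]
  have hlen : ((dpListB K rev i).drop (i - (K+1))).length = K + 1 := by
    simp [length_dpListB]; omega
  rcases hd : (dpListB K rev i).drop (i - (K+1)) with _ | ⟨a, t⟩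
  · rw [hd] at hlen; simp at hlen
  · have hw := wmin_drop K rev i (i - (K+1)) (by omega)
    rw [hd] at hw
    simp only at hw
    rw [PySem.List.min?_id_cons]
    simp only [Option.getD_some]
    refine ⟨hw, ?_⟩
    obtain ⟨⟨p0, hp01, hp02, hp03⟩, hmin⟩ := hw
    have hmem : t.foldl min a ∈ dpListB K rev i ++ List.replicate (n - i) (0:Int) := by
      rw [← hp03]; exact mem_dp_append K rev n i p0 hp02 (by omega)
    obtain ⟨q0, hq0⟩ := (PySem.List.index?_isSome_iff _ _).mpr hmem |> Option.isSome_iff_exists.mp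
    obtain ⟨hq0lt, hq0val, hq0first⟩ := PySem.List.getElem_of_index?_eq_some hq0
    have hq0p0 : q0 ≤ p0 := by
      by_contra hc
      have hplt : p0 < (dpListB K rev i ++ List.replicate (n - i) (0:Int)).length := by
        simp [length_dpListB]; omega
      have : (dpListB K rev i ++ List.replicate (n - i) (0:Int))[p0]'hplt = t.foldl min a := by
        rw [List.getElem_append_left (by simp [length_dpListB]; omega), getElem_dpListB, hp03]
      exact hq0first p0 (by omega) this
    refine ⟨q0, by rw [hq0, Option.getD_some], by omega, ?_⟩
    rw [← hq0val, List.getElem_append_left (by simp [length_dpListB]; omega), getElem_dpListB]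

def InvA (K : Nat) (rev : List Int) (i : Nat) (mv mi : Int) : Prop :=
  (∀ j : Nat, i - (K+1) ≤ j → j < i → mv ≤ dpV K rev j) ∧
  (∃ p : Nat, p < i ∧ mi ≤ (p:Int) ∧ 0 ≤ mi ∧ dpV K rev p = mv)

theorem stepA_eval (K : Nat) (rev : List Int) (n i : Nat) (hn : n = rev.length)
    (hi : K + 1 ≤ i) (hin : i < n) (mv mi : Int) (hInv : InvA K rev i mv mi) :
    ∃ mv' mi', stepA (K:Int) rev (dpListB K rev i ++ List.replicate (n - i) (0:Int), mv, mi) (i:Int)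
        = (dpListB K rev (i+1) ++ List.replicate (n - (i+1)) 0, mv', mi')
      ∧ InvA K rev (i+1) mv' mi' := by
  obtain ⟨hWm0, q0, hq0eq, hq0lt, hq0val⟩ := recompute_eval K rev n i hn hi hin
  obtain ⟨hble, p1, hp1lt, hmile, hminn, hp1val⟩ := hInv
  obtain ⟨m0, hm0W, hm0eq⟩ := dpV_of_gt K rev (show K < i by omega)
  -- the pair after the conditional rescan: its value is the true window minimum
  set dp := dpListB K rev i ++ List.replicate (n - i) (0:Int) with hdp
  set P : Int × Int :=
    (if (i:Int) - mi > (K:Int) then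
      ((((PySem.List.min? (PySem.List.slice dp (some ((i:Int) - (K:Int) - 1)) (some (i:Int))) (fun x => x)).getD 0)),
       (((PySem.List.index? dp ((PySem.List.min? (PySem.List.slice dp (some ((i:Int) - (K:Int) - 1)) (some (i:Int))) (fun x => x)).getD 0)).getD 0 : Nat) : Int))
    else (mv, mi)) with hP
  have hPprop : IsWMin K rev (i - (K+1)) i P.1 ∧ ∃ p : Nat, p < i ∧ P.2 ≤ (p:Int) ∧ 0 ≤ P.2 ∧ dpV K rev p = P.1 := by
    rw [hP]
    by_cases hrec : (i:Int) - mi > (K:Int)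
    · rw [if_pos hrec]
      refine ⟨hWm0, q0, by omega, by rw [hq0eq], by rw [hq0eq]; omega, by rw [hq0eq]; exact hq0val⟩
    · rw [if_neg hrec]
      refine ⟨⟨⟨p1, by omega, hp1lt, hp1val⟩, hble⟩, p1, hp1lt, hmile, hminn, hp1val⟩
  have hdpVi : dpV K rev i = P.1 + rev.getD i 0 := by
    rw [hm0eq, IsWMin_unique K rev hm0W hPprop.1]
  have hset : PySem.List.pySetD dp (i:Int) (P.1 + PySem.List.pyGetD rev (i:Int) 0)
      = dpListB K rev (i+1) ++ List.replicate (n - (i+1)) 0 := by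
    rw [PySem.List.pySetD_natCast, PySem.List.pyGetD_natCast, hdp,
      set_dp K rev n i hin _ (by rw [hdpVi])]
  have hread : PySem.List.pyGetD (dpListB K rev (i+1) ++ List.replicate (n - (i+1)) (0:Int)) (i:Int) 0
      = dpV K rev i := by
    rw [PySem.List.pyGetD_natCast, getD_dp_append K rev n (i+1) i (by omega) (by omega)]
  have hstep : stepA (K:Int) rev (dp, mv, mi) (i:Int)
      = (if dpV K rev i < P.1
          then (dpListB K rev (i+1) ++ List.replicate (n - (i+1)) 0, dpV K rev i, (i:Int))
          else (dpListB K rev (i+1) ++ List.replicate (n - (i+1)) 0, P.1, P.2)) := by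
    simp only [stepA, ← hP, hset, hread]
  rw [hstep]
  by_cases hlt : dpV K rev i < P.1
  · rw [if_pos hlt]
    refine ⟨_, _, rfl, ?_, ⟨i, by omega, by omega, by omega, rfl⟩⟩
    intro j hj1 hj2
    rcases Nat.lt_or_ge j i with hji | hji
    · exact le_of_lt (lt_of_lt_of_le hlt (hPprop.1.2 j (by omega) hji))
    · have : j = i := by omega
      rw [this]
  · rw [if_neg hlt]
    obtain ⟨hW, p2, hp2⟩ := hPprop
    refine ⟨_, _, rfl, ?_, ⟨p2, by omega, hp2.2.1, hp2.2.2.1, hp2.2.2.2⟩⟩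
    intro j hj1 hj2
    rcases Nat.lt_or_ge j i with hji | hji
    · exact hW.2 j (by omega) hji
    · have : j = i := by omega
      rw [this]; omega

theorem loopA (K : Nat) (rev : List Int) (n : Nat) (hn : n = rev.length) :
    ∀ (c i : Nat), i + c = n → K + 1 ≤ i → ∀ mv mi, InvA K rev i mv mi →
    ((PySem.List.pyRange (i:Int) (n:Int) 1).foldl (stepA (K:Int) rev)
        (dpListB K rev i ++ List.replicate (n - i) (0:Int), mv, mi)).1 = dpListB K rev n := by
  intro c
  induction c with
  | zero =>
    intro i hc hi mv mi hInv
    have : i = n := by omega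
    subst this
    rw [PySem.List.pyRange_one_eq_nil (by omega)]
    simp
  | succ c ih =>
    intro i hc hi mv mi hInv
    rw [PySem.List.pyRange_one_cons (by exact_mod_cast Nat.lt_of_lt_of_le (Nat.lt_succ_self i) (by omega) : (i:Int) < (n:Int))]
    rw [List.foldl_cons]
    obtain ⟨mv', mi', heq, hInv'⟩ := stepA_eval K rev n i hn hi (by omega) mv mi hInv
    rw [heq]
    have hc1 : ((i:Int) + 1) = (((i+1 : Nat)):Int) := by push_cast; ring
    rw [hc1]
    exact ih (i+1) (by omega) (by omega) mv' mi' hInv'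

theorem initA (K : Nat) (rev : List Int) :
    ∀ (m : Nat), m ≤ rev.length → m ≤ K + 1 →
    (PySem.List.pyRange 0 (m:Int) 1).foldl
        (fun dp i => PySem.List.pySetD dp i (PySem.List.pyGetD rev i 0))
        (List.replicate rev.length (0:Int))
      = dpListB K rev m ++ List.replicate (rev.length - m) 0 := by
  intro m
  induction m with
  | zero => intro _ _; rw [PySem.List.pyRange_one_eq_nil (by omega)]; simp [dpListB]
  | succ m ih =>
    intro hm hmK
    have hc1 : (((m+1 : Nat)):Int) = ((m:Nat):Int) + 1 := by push_cast; ring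
    rw [hc1, PySem.List.pyRange_one_succ_right (by omega), List.foldl_append, ih (by omega) (by omega)]
    simp only [List.foldl_cons, List.foldl_nil]
    rw [PySem.List.pySetD_natCast, PySem.List.pyGetD_natCast]
    rw [set_dp K rev rev.length m (by omega) _ (by rw [dpV_of_le K rev (by omega)])]

theorem index_dp (K : Nat) (rev : List Int) (n i : Nat) (m : Int) (p0 : Nat)
    (hp0 : p0 < i) (hin : i ≤ n) (hpv : dpV K rev p0 = m) :
    ∃ q0 : Nat, PySem.List.index? (dpListB K rev i ++ List.replicate (n - i) (0:Int)) m = some q0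
      ∧ q0 < i ∧ dpV K rev q0 = m := by
  have hmem : m ∈ dpListB K rev i ++ List.replicate (n - i) (0:Int) := by
    rw [← hpv]; exact mem_dp_append K rev n i p0 hp0 hin
  obtain ⟨q0, hq0⟩ := (PySem.List.index?_isSome_iff _ _).mpr hmem |> Option.isSome_iff_exists.mp
  obtain ⟨hq0lt, hq0val, hq0first⟩ := PySem.List.getElem_of_index?_eq_some hq0
  have hq0p0 : q0 ≤ p0 := by
    by_contra hcon
    have hplt : p0 < (dpListB K rev i ++ List.replicate (n - i) (0:Int)).length := by
      simp [length_dpListB]; omega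
    have : (dpListB K rev i ++ List.replicate (n - i) (0:Int))[p0]'hplt = m := by
      rw [List.getElem_append_left (by simp [length_dpListB]; omega), getElem_dpListB, hpv]
    exact hq0first p0 (by omega) this
  refine ⟨q0, hq0, by omega, ?_⟩
  rw [← hq0val, List.getElem_append_left (by simp [length_dpListB]; omega), getElem_dpListB]

theorem A_final (K : Nat) (rev : List Int) (hkn : K < rev.length) :
    ∃ w, IsWMin K rev (rev.length - (K+1)) rev.length w
      ∧ billboards (K:Int) rev = rev.sum - w := by
  have hc1 : (K:Int) + 1 = (((K+1 : Nat)):Int) := by push_cast; ring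
  -- initial dp
  have hinit := initA K rev (K+1) (by omega) (le_refl _)
  -- initial minimum: the window [0, K+1)
  have hlen1 : (dpListB K rev (K+1)).length = K + 1 := length_dpListB K rev (K+1)
  rcases hd0 : dpListB K rev (K+1) with _ | ⟨a, t⟩
  · rw [hd0] at hlen1; simp at hlen1
  have htake : PySem.List.slice (dpListB K rev (K+1) ++ List.replicate (rev.length - (K+1)) (0:Int)) none (some ((K:Int)+1))
      = a :: t := by
    rw [hc1, PySem.List.slice_to_natCast,
      List.take_append_of_le_length (by simp [length_dpListB]),
      List.take_of_length_le (by simp [length_dpListB]), hd0]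
  have hw0 := wmin_drop K rev (K+1) 0 (by omega)
  rw [List.drop_zero, hd0] at hw0
  simp only at hw0
  obtain ⟨q0, hq0, hq0lt, hq0val⟩ := index_dp K rev rev.length (K+1) (t.foldl min a)
    (Classical.choose hw0.1) (by
      have := Classical.choose_spec hw0.1; omega) (by omega) (by
      have := Classical.choose_spec hw0.1; exact this.2.2)
  have hInv0 : InvA K rev (K+1) (t.foldl min a) ((q0:Nat):Int) := by
    refine ⟨fun j hj1 hj2 => hw0.2 j (by omega) hj2, q0, hq0lt, by omega, by omega, hq0val⟩
  have hloop := loopA K rev rev.length rfl (rev.length - (K+1)) (K+1) (by omega) (le_refl _) (t.foldl min a) ((q0:Nat):Int) hInv0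
  -- final window minimum
  have hlen2 : ((dpListB K rev rev.length).drop (rev.length - (K+1))).length = K + 1 := by
    simp [length_dpListB]; omega
  rcases hdf : (dpListB K rev rev.length).drop (rev.length - (K+1)) with _ | ⟨b, u⟩
  · rw [hdf] at hlen2; simp at hlen2
  have hwf := wmin_drop K rev rev.length (rev.length - (K+1)) (by omega)
  rw [hdf] at hwf
  simp only at hwf
  refine ⟨u.foldl min b, hwf, ?_⟩
  -- now unfold the port
  simp only [billboards]
  rw [if_neg (show ¬((K:Int) = (rev.length:Int)) by omega)]
  rw [hc1] at htake ⊢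
  rw [hinit, htake, PySem.List.min?_id_cons, Option.getD_some, hq0]
  simp only [Option.getD_some]
  rw [hloop]  -- ?? hloop is about .1 of the fold; goal has min? (slice (fold).1 ...)
  have hslice : PySem.List.slice (dpListB K rev rev.length) (some ((rev.length:Int) - (K:Int) - 1)) none
      = b :: u := by
    have hc2 : (rev.length:Int) - (K:Int) - 1 = (((rev.length - (K+1) : Nat)):Int) := by omega
    rw [hc2, PySem.List.slice_from_natCast, hdf]
  rw [hslice, PySem.List.min?_id_cons, Option.getD_some]

theorem popFrontB_sublist (b : Int) (q : List (Int × Int)) : (popFrontB b q).Sublist q := by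
  induction q with
  | nil => simp [popFrontB]
  | cons a t ih =>
    rw [popFrontB]
    split
    · exact ih.cons a
    · exact List.Sublist.refl _

theorem mem_popFrontB (b : Int) (q : List (Int × Int)) (p : Int × Int)
    (hp : p ∈ q) (hge : ¬ p.1 < b) : p ∈ popFrontB b q := by
  induction q with
  | nil => simp at hp
  | cons a t ih =>
    rw [popFrontB]
    split
    · rcases List.mem_cons.mp hp with h | h
      · subst h; omega
      · exact ih h
    · exact hp

theorem popFrontB_head (b : Int) (q h : _) (hs : List (Int × Int)) (he : popFrontB b q = h :: hs) :
    ¬ h.1 < b := by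
  induction q with
  | nil => simp [popFrontB] at he
  | cons a t ih =>
    rw [popFrontB] at he
    split at he
    · exact ih he
    · cases he; assumption

theorem popBackGeB_cons (v : Int) (a : Int × Int) (t : List (Int × Int)) :
    popBackGeB v (a :: t)
      = if popBackGeB v t = [] then (if v ≤ a.2 then [] else [a]) else a :: popBackGeB v t := by
  unfold popBackGeB
  rw [List.reverse_cons, List.dropWhile_append]
  by_cases h : (t.reverse.dropWhile (fun p => decide (v ≤ p.2))).isEmpty
  · rw [if_pos h]
    rw [List.isEmpty_iff] at h
    rw [if_pos (by rw [h]; rfl)]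
    by_cases hv : v ≤ a.2
    · rw [if_pos hv]; simp [List.dropWhile, hv]
    · rw [if_neg hv]; simp [List.dropWhile, hv]
  · rw [if_neg h]
    rw [List.isEmpty_iff] at h
    rw [if_neg (by simpa using h)]
    rw [List.reverse_append, List.reverse_cons]
    simp

theorem popBackGeB_eq_takeWhile (v : Int) (q : List (Int × Int))
    (hq : q.Pairwise (fun p r => p.2 < r.2)) :
    popBackGeB v q = q.takeWhile (fun p => decide (p.2 < v)) := by
  induction q with
  | nil => rfl
  | cons a t ih =>
    rw [List.pairwise_cons] at hq
    have iht := ih hq.2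
    have htw : ¬ a.2 < v → t.takeWhile (fun p => decide (p.2 < v)) = [] := by
      intro hv
      cases ht : t with
      | nil => simp
      | cons b u =>
        rw [List.takeWhile_cons, if_neg]
        have := hq.1 b (by rw [ht]; exact List.mem_cons_self)
        simp; omega
    rw [popBackGeB_cons, List.takeWhile_cons, iht]
    by_cases hv : a.2 < v
    · by_cases hte : t.takeWhile (fun p => decide (p.2 < v)) = []
      · rw [if_pos hte, if_neg (by omega), if_pos (by simpa using hv), hte]
      · rw [if_neg hte, if_pos (by simpa using hv)]
    · rw [if_pos (htw hv), if_pos (by omega), if_neg (by simp; omega)]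

def loB (K i : Nat) : Nat := if i ≤ K + 1 then 0 else i - (K + 2)

def InvB (K : Nat) (rev : List Int) (i : Nat) (q : List (Int × Int)) : Prop :=
  q.Pairwise (fun p r => p.1 < r.1) ∧ q.Pairwise (fun p r => p.2 < r.2) ∧
  (∀ p ∈ q, ∃ j : Nat, p.1 = (j:Int) ∧ j < i ∧ loB K i ≤ j ∧ p.2 = dpV K rev j) ∧
  (∀ j : Nat, loB K i ≤ j → j < i → ∃ p ∈ q, (j:Int) ≤ p.1 ∧ p.2 ≤ dpV K rev j)

theorem popFront_min (K : Nat) (rev : List Int) (i b : Nat) (q : List (Int × Int))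
    (hb1 : loB K i ≤ b) (hb2 : b < i) (hInv : InvB K rev i q) :
    ((popFrontB ((b:Nat):Int) q).Pairwise (fun p r => p.1 < r.1)
      ∧ (popFrontB ((b:Nat):Int) q).Pairwise (fun p r => p.2 < r.2))
    ∧ (∀ p ∈ popFrontB ((b:Nat):Int) q, ∃ j : Nat, p.1 = (j:Int) ∧ j < i ∧ b ≤ j ∧ p.2 = dpV K rev j)
    ∧ (∀ j : Nat, b ≤ j → j < i → ∃ p ∈ popFrontB ((b:Nat):Int) q, (j:Int) ≤ p.1 ∧ p.2 ≤ dpV K rev j)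
    ∧ ∃ h hs, popFrontB ((b:Nat):Int) q = h :: hs ∧ IsWMin K rev b i h.2 := by
  obtain ⟨hpi, hpv, hmem, hdom⟩ := hInv
  have hsub := popFrontB_sublist ((b:Nat):Int) q
  have hpi' := hpi.sublist hsub
  have hpv' := hpv.sublist hsub
  have hdom' : ∀ j : Nat, b ≤ j → j < i → ∃ p ∈ popFrontB ((b:Nat):Int) q, (j:Int) ≤ p.1 ∧ p.2 ≤ dpV K rev j := by
    intro j hj1 hj2
    obtain ⟨p, hpq, hple, hpval⟩ := hdom j (by omega) hj2
    exact ⟨p, mem_popFrontB _ _ _ hpq (by omega), hple, hpval⟩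
  rcases hq' : popFrontB ((b:Nat):Int) q with _ | ⟨h, hs⟩
  · obtain ⟨p, hpq, -, -⟩ := hdom' (i-1) (by omega) (by omega)
    rw [hq'] at hpq
    simp at hpq
  have hhead : ¬ h.1 < ((b:Nat):Int) := popFrontB_head _ _ _ _ hq'
  have hmem' : ∀ p ∈ popFrontB ((b:Nat):Int) q, ∃ j : Nat, p.1 = (j:Int) ∧ j < i ∧ b ≤ j ∧ p.2 = dpV K rev j := by
    intro p hp
    obtain ⟨j, hj1, hj2, hj3, hj4⟩ := hmem p (hsub.mem hp)
    refine ⟨j, hj1, hj2, ?_, hj4⟩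
    rw [hq'] at hp
    rcases List.mem_cons.mp hp with rfl | hp
    · rw [hj1] at hhead; omega
    · rw [hq'] at hpi'
      have := (List.pairwise_cons.mp hpi').1 p hp
      rw [hj1] at this
      omega
  rw [hq'] at hpi' hpv' hmem' hdom'
  refine ⟨⟨hpi', hpv'⟩, hmem', hdom', h, hs, rfl, ?_⟩
  constructor
  · obtain ⟨j, hj1, hj2, hj3, hj4⟩ := hmem' h List.mem_cons_self
    exact ⟨j, hj3, hj2, hj4.symm⟩
  · intro j hj1 hj2
    obtain ⟨p, hpq, hple, hpval⟩ := hdom' j hj1 hj2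
    have : h.2 ≤ p.2 := by
      rcases List.mem_cons.mp hpq with rfl | hpq
      · omega
      · exact le_of_lt ((List.pairwise_cons.mp hpv').1 p hpq)
    omega

theorem mem_takeWhile_of_val_lt (v : Int) (q : List (Int × Int))
    (hpv : q.Pairwise (fun p r => p.2 < r.2)) (p : Int × Int) (hp : p ∈ q) (hlt : p.2 < v) :
    p ∈ q.takeWhile (fun r => decide (r.2 < v)) := by
  induction q with
  | nil => simp at hp
  | cons a t ih =>
    rw [List.pairwise_cons] at hpv
    rw [List.takeWhile_cons]
    by_cases ha : a.2 < v
    · rw [if_pos (by simpa using ha)]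
      rcases List.mem_cons.mp hp with rfl | hp
      · exact List.mem_cons_self
      · exact List.mem_cons_of_mem _ (ih hpv.2 hp)
    · rcases List.mem_cons.mp hp with rfl | hp
      · omega
      · have := hpv.1 p hp; omega

theorem pushB (K : Nat) (rev : List Int) (i : Nat) (q' : List (Int × Int)) (b : Nat)
    (hb : b = loB K (i+1)) (hbi : b ≤ i)
    (hpi : q'.Pairwise (fun p r => p.1 < r.1)) (hpv : q'.Pairwise (fun p r => p.2 < r.2))
    (hmem : ∀ p ∈ q', ∃ j : Nat, p.1 = (j:Int) ∧ j < i ∧ b ≤ j ∧ p.2 = dpV K rev j)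
    (hdom : ∀ j : Nat, b ≤ j → j < i → ∃ p ∈ q', (j:Int) ≤ p.1 ∧ p.2 ≤ dpV K rev j) :
    InvB K rev (i+1) (popBackGeB (dpV K rev i) q' ++ [((i:Int), dpV K rev i)]) := by
  rw [popBackGeB_eq_takeWhile _ _ hpv]
  have hsub := (List.takeWhile_prefix (l := q') (fun r => decide (r.2 < dpV K rev i))).sublist
  have htwmem : ∀ p ∈ q'.takeWhile (fun r => decide (r.2 < dpV K rev i)), p ∈ q' ∧ p.2 < dpV K rev i := by
    intro p hp
    exact ⟨hsub.mem hp, by simpa using List.mem_takeWhile_imp hp⟩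
  refine ⟨?_, ?_, ?_, ?_⟩
  · rw [List.pairwise_append]
    refine ⟨hpi.sublist hsub, by simp, ?_⟩
    intro p hp r hr
    obtain ⟨j, hj1, hj2, -, -⟩ := hmem p (htwmem p hp).1
    simp at hr
    rw [hr, hj1]
    push_cast
    omega
  · rw [List.pairwise_append]
    refine ⟨hpv.sublist hsub, by simp, ?_⟩
    intro p hp r hr
    simp at hr
    rw [hr]
    exact (htwmem p hp).2
  · intro p hp
    rcases List.mem_append.mp hp with hp | hp
    · obtain ⟨j, hj1, hj2, hj3, hj4⟩ := hmem p (htwmem p hp).1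
      exact ⟨j, hj1, by omega, by omega, hj4⟩
    · simp at hp
      exact ⟨i, by rw [hp], by omega, by omega, by rw [hp]⟩
  · intro j hj1 hj2
    rcases Nat.lt_or_ge j i with hji | hji
    · rcases Int.lt_or_le (dpV K rev j) (dpV K rev i) with hlt | hle
      · obtain ⟨p, hpq, hple, hpval⟩ := hdom j (by omega) hji
        exact ⟨p, List.mem_append_left _
          (mem_takeWhile_of_val_lt _ _ hpv p hpq (by omega)), hple, hpval⟩
      · refine ⟨((i:Int), dpV K rev i), List.mem_append_right _ (by simp), by omega, hle⟩
    · have : j = i := by omega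
      subst this
      exact ⟨((j:Int), dpV K rev j), List.mem_append_right _ (by simp), by omega, le_refl _⟩

theorem stepB_eval (K : Nat) (rev : List Int) (n i : Nat) (hn : n = rev.length) (hin : i < n)
    (q : List (Int × Int)) (hInv : InvB K rev i q) :
    InvB K rev (i+1) (stepB (K:Int) q ((i:Int), PySem.List.pyGetD rev (i:Int) 0)) := by
  have hr : PySem.List.pyGetD rev (i:Int) 0 = rev.getD i 0 := PySem.List.pyGetD_natCast rev i 0
  by_cases hik : (i:Int) ≤ (K:Int)
  · have hikn : i ≤ K := by exact_mod_cast hik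
    have hv : rev.getD i 0 = dpV K rev i := (dpV_of_le K rev hikn).symm
    have hstep : stepB (K:Int) q ((i:Int), PySem.List.pyGetD rev (i:Int) 0)
        = popBackGeB (dpV K rev i) q ++ [((i:Int), dpV K rev i)] := by
      simp only [stepB, if_pos hik, hr, hv]
    rw [hstep]
    obtain ⟨hpi, hpv, hmem, hdom⟩ := hInv
    have hlo : loB K i = 0 := by unfold loB; rw [if_pos (by omega)]
    refine pushB K rev i q 0 ?_ (by omega) hpi hpv ?_ ?_
    · unfold loB; rw [if_pos (by omega)]
    · intro p hp; obtain ⟨j, h1, h2, h3, h4⟩ := hmem p hp; exact ⟨j, h1, h2, by omega, h4⟩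
    · intro j h1 h2; exact hdom j (by omega) h2
  · have hikn : K < i := by omega
    have hcast : (i:Int) - (K:Int) - 1 = (((i - (K+1) : Nat)):Int) := by omega
    obtain ⟨⟨hpi', hpv'⟩, hmem', hdom', h, hs, hq', hWm⟩ :=
      popFront_min K rev i (i - (K+1)) q
        (by unfold loB; split <;> omega) (by omega) hInv
    obtain ⟨m0, hm0W, hm0eq⟩ := dpV_of_gt K rev hikn
    have hveq : (((popFrontB ((i:Int) - (K:Int) - 1) q).headD (0, 0)).2 + PySem.List.pyGetD rev (i:Int) 0)
        = dpV K rev i := by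
      rw [hcast, hq']
      simp only [List.headD_cons]
      rw [hr, hm0eq, IsWMin_unique K rev hm0W hWm]
    have hstep : stepB (K:Int) q ((i:Int), PySem.List.pyGetD rev (i:Int) 0)
        = popBackGeB (dpV K rev i) (popFrontB ((i:Int) - (K:Int) - 1) q) ++ [((i:Int), dpV K rev i)] := by
      simp only [stepB, if_neg hik, hveq]
    rw [hstep, hcast, hq']
    rw [hq'] at hpi' hpv' hmem' hdom'
    refine pushB K rev i (h :: hs) (i - (K+1)) ?_ (by omega) hpi' hpv' hmem' hdom'
    unfold loB; rw [if_neg (by omega)]; omega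

theorem loopB (K : Nat) (rev : List Int) (n : Nat) (hn : n = rev.length) :
    ∀ (c i : Nat), i + c = n → ∀ q, InvB K rev i q →
    InvB K rev n ((PySem.List.pyRange (i:Int) (n:Int) 1).foldl
      (fun q j => stepB (K:Int) q (j, PySem.List.pyGetD rev j 0)) q) := by
  intro c
  induction c with
  | zero =>
    intro i hc q hInv
    have : i = n := by omega
    subst this
    rw [PySem.List.pyRange_one_eq_nil (by omega)]
    exact hInv
  | succ c ih =>
    intro i hc q hInv
    rw [PySem.List.pyRange_one_cons (by exact_mod_cast (by omega : i < n) : (i:Int) < (n:Int))]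
    rw [List.foldl_cons]
    have h1 := stepB_eval K rev n i hn (by omega) q hInv
    have hc1 : ((i:Int) + 1) = (((i+1 : Nat)):Int) := by push_cast; ring
    rw [hc1]
    exact ih (i+1) (by omega) _ h1

theorem B_final (K : Nat) (rev : List Int) (hkn : K < rev.length) :
    ∃ w, IsWMin K rev (rev.length - (K+1)) rev.length w
      ∧ billboards_alt (K:Int) rev = rev.sum - w := by
  simp only [billboards_alt]
  rw [if_neg (show ¬((K:Int) = (rev.length:Int)) by omega)]
  rw [PySem.List.enumerate_eq_map_pyRange rev 0, List.foldl_map]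
  simp only [PySem.List.len_eq]
  have h0 : InvB K rev 0 [] := by
    refine ⟨by simp, by simp, by simp, ?_⟩
    intro j _ h2; omega
  have hloop := loopB K rev rev.length rfl rev.length 0 (by omega) [] h0
  rw [show ((0:Nat):Int) = (0:Int) by simp] at hloop
  obtain ⟨⟨-, -⟩, -, -, h, hs, hq', hWm⟩ :=
    popFront_min K rev rev.length (rev.length - (K+1)) _
      (by unfold loB; split <;> omega) (by omega) hloop
  have hcast : (rev.length:Int) - (K:Int) - 1 = (((rev.length - (K+1) : Nat)):Int) := by omega
  rw [hcast, hq']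
  exact ⟨h.2, hWm, by simp⟩

theorem main_eq (k : Int) (revenue : List Int) (h0 : 0 ≤ k) (hk : k ≤ (revenue.length:Int)) :
    billboards k revenue = billboards_alt k revenue := by
  by_cases he : k = (revenue.length:Int)
  · simp only [billboards, billboards_alt, if_pos he]
  · obtain ⟨K, rfl⟩ : ∃ K : Nat, k = (K:Int) := ⟨k.toNat, by omega⟩
    have hkn : K < revenue.length := by
      have : (K:Int) < (revenue.length:Int) := by omega
      exact_mod_cast this
    obtain ⟨w1, hw1, he1⟩ := A_final K revenue hkn
    obtain ⟨w2, hw2, he2⟩ := B_final K revenue hkn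
    rw [he1, he2, IsWMin_unique K revenue hw1 hw2]

-- ===== VERDICT (by name: the statement is the Claim_ definition above) =====
theorem billboards_spec : Claim_equal_billboards := by
  intro k revenue _ hpre
  unfold Pre_billboards at hpre
  unfold Spec_billboards
  exact main_eq k revenue hpre.1 hpre.2
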